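-- pv_equiv track=rewrite | github.com/YoonTaeMinnnn/Algorithm | 프로그래머스/해시/숫자게임.py | solution
-- ===== SOURCE A (Python) =====
-- from heapq import heappush, heappop, heapify
--
-- def solution(A, B):
--     answer = 0
--     A = [-i for i in A]
--     B = [-i for i in B]
--     heapify(A)
--     heapify(B)
--
--     while A and B:
--         a = heappop(A)
--         b = heappop(B)
--         if -a < -b:
--             answer += 1
--         else:
--             heappush(B, b)
--
--
--
--     return answer
-- ===== SOURCE B (Python) =====
-- def solution(A, B):
--     # Event sweep: one merged sort of both lists tagged by side, then a single
--     # counter scan -- a B seen earlier in descending order strictly beats any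
--     # later A (ties put the A element first, so equal values never count).
--     events = sorted([(a, 0) for a in A] + [(b, 1) for b in B],
--                     key=lambda p: (-p[0], p[1]))
--     avail = 0
--     wins = 0
--     for _, tag in events:
--         if tag:
--             avail += 1
--         elif avail:
--             avail -= 1
--             wins += 1
--     return wins
-- ===== Notes on version B (the rewrite author's own statement) =====
-- stated objective: alternative
-- what changed: Replaces the two max-heaps with repeated pop/push-back by one merged sort of both lists tagged by side (key (-value, tag), ties give the A element first) and a single counter sweep over the merged events: a B event enters the pool of available winners, an A event consumes one pool entry as a win if any is available.
import Mathlib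
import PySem

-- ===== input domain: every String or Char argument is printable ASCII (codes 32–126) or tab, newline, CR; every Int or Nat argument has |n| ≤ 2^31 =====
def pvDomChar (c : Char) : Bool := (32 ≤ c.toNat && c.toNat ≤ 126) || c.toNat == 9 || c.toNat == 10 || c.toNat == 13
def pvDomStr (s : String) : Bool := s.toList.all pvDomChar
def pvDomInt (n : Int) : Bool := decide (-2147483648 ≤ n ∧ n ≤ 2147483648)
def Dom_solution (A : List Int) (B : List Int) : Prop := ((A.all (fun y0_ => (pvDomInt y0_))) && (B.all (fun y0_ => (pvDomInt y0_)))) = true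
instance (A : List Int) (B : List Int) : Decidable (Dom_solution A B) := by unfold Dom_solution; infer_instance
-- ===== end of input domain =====

-- B replaces A's two heaps by one merged descending sort of both lists tagged by side
-- and a single counter sweep over it (objective: a genuinely different, alternative algorithm).


-- ===== PORT A =====
-- The heaps are modelled at the level of heapq's observable values on Int:
-- heappop extracts the minimum element (exact: equal Ints are interchangeable),
-- heappush adds the element back.  The pop-pop-compare-push loop is kept as is.
def solLoop (A : List Int) (B : List Int) (answer : Int) : Int :=
  match hA : PySem.List.min? A (fun x => x), PySem.List.min? B (fun x => x) with
  | some a, some b =>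
      if -a < -b then solLoop (A.erase a) (B.erase b) (answer + 1)
      else solLoop (A.erase a) (b :: B.erase b) answer   -- heappush B b after the pop
  | _, _ => answer
termination_by A.length
decreasing_by
  all_goals
    have hm : a ∈ A := PySem.List.min?_mem hA
    have := List.length_erase_of_mem hm
    have := List.length_pos_of_mem hm
    omega

def solution (A : List Int) (B : List Int) : Int :=
  solLoop (A.map (fun i => -i)) (B.map (fun i => -i)) 0

-- ===== PORT B =====
-- Source B: events = sorted(tagged A ++ tagged B, key=lambda p: (-p[0], p[1])); one counter sweep.
def solution_alt (A : List Int) (B : List Int) : Int :=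
  let events := PySem.List.sorted2
      ((A.map (fun a => (a, (0 : Int)))) ++ (B.map (fun b => (b, (1 : Int)))))
      (fun p => -p.1) (fun p => p.2) false
  (events.foldl (fun (st : Int × Int) e =>
      if e.2 ≠ 0 then (st.1 + 1, st.2)
      else if st.1 ≠ 0 then (st.1 - 1, st.2 + 1)
      else st) ((0 : Int), (0 : Int))).2

-- ===== PRECONDITION & SPEC =====
def Spec_solution (A : List Int) (B : List Int) (out : Int) : Prop := out = solution_alt A B
instance (A : List Int) (B : List Int) (out : Int) : Decidable (Spec_solution A B out) := by unfold Spec_solution; infer_instance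

-- ===== CLAIM (what is proved, stated in full; the proofs are below) =====
def Claim_equal_solution : Prop := ∀ (A : List Int) (B : List Int), Dom_solution A B → Spec_solution A B (solution A B)

-- ===== LEMMAS AND PROOFS =====

-- ---------- A-side: the heap loop on sorted (negated) lists ----------

-- the loop of A specialised to ascending (negated) lists
def cnt : List Int → List Int → Int → Int
  | x :: X, y :: Y, c => if -x < -y then cnt X Y (c + 1) else cnt X (y :: Y) c
  | _, _, c => c

-- the descending two-pointer count both sides are reduced to
def twoPtr : List Int → List Int → Nat
  | a :: As, b :: Bs => if b > a then twoPtr As Bs + 1 else twoPtr As (b :: Bs)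
  | _, _ => 0

lemma min?_perm {l₁ l₂ : List Int} (h : l₁.Perm l₂) :
    PySem.List.min? l₁ (fun x => x) = PySem.List.min? l₂ (fun x => x) := by
  cases h₁ : PySem.List.min? l₁ (fun x => x) with
  | none =>
      rw [PySem.List.min?_eq_none_iff] at h₁
      subst h₁
      have h2 : l₂ = [] := h.symm.eq_nil
      simp [h2, PySem.List.min?]
  | some m =>
      cases h₂ : PySem.List.min? l₂ (fun x => x) with
      | none =>
          rw [PySem.List.min?_eq_none_iff] at h₂
          subst h₂
          have h1 : l₁ = [] := h.eq_nil
          rw [h1] at h₁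
          simp [PySem.List.min?] at h₁
      | some m' =>
          have hm₁ : m ∈ l₁ := PySem.List.min?_mem h₁
          have hm₂ : m' ∈ l₂ := PySem.List.min?_mem h₂
          have h₁' := PySem.List.min?_isMin h₁ m' (h.symm.mem_iff.1 hm₂)
          have h₂' := PySem.List.min?_isMin h₂ m (h.mem_iff.1 hm₁)
          simp only [Option.some.injEq]
          omega

lemma solLoop_perm : ∀ (n : Nat) (A₁ A₂ B₁ B₂ : List Int) (c : Int),
    A₁.length = n → A₁.Perm A₂ → B₁.Perm B₂ →
    solLoop A₁ B₁ c = solLoop A₂ B₂ c := by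
  intro n
  induction n using Nat.strong_induction_on with
  | _ n ih =>
    intro A₁ A₂ B₁ B₂ c hn hA hB
    rw [solLoop, solLoop]
    have eA := min?_perm hA
    have eB := min?_perm hB
    cases h₁ : PySem.List.min? A₁ (fun x => x) with
    | none => rw [h₁] at eA; rw [← eA]
    | some a =>
      rw [h₁] at eA
      cases h₂ : PySem.List.min? B₁ (fun x => x) with
      | none => rw [h₂] at eB; rw [← eA, ← eB]
      | some b =>
        rw [h₂] at eB
        rw [← eA, ← eB]
        have hmA : a ∈ A₁ := PySem.List.min?_mem h₁
        have hlen : (A₁.erase a).length < n := by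
          have := List.length_erase_of_mem hmA
          have := List.length_pos_of_mem hmA
          omega
        by_cases hc : -a < -b
        · simp only [hc, if_pos]
          exact ih _ hlen _ _ _ _ _ rfl (hA.erase a) (hB.erase b)
        · simp only [hc, if_neg, not_false_iff]
          exact ih _ hlen _ _ _ _ _ rfl (hA.erase a) ((hB.erase b).cons b)

lemma foldl_min_eq (X : List Int) : ∀ (x : Int), (∀ y ∈ X, x ≤ y) → X.foldl min x = x := by
  induction X with
  | nil => intro x _; rfl
  | cons y X ih =>
    intro x h
    have hxy : min x y = x := min_eq_left (h y (by simp))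
    simp only [List.foldl_cons, hxy]
    exact ih x (fun z hz => h z (by simp [hz]))

lemma min?_id_of_sorted (x : Int) (X : List Int) (h : (x :: X).Pairwise (· ≤ ·)) :
    PySem.List.min? (x :: X) (fun y => y) = some x := by
  rw [PySem.List.min?_id_cons]
  rw [foldl_min_eq X x (List.pairwise_cons.1 h).1]

lemma solLoop_sorted : ∀ (X Y : List Int) (c : Int),
    X.Pairwise (· ≤ ·) → Y.Pairwise (· ≤ ·) → solLoop X Y c = cnt X Y c := by
  intro X
  induction X with
  | nil => intro Y c _ _; rw [solLoop]; simp [PySem.List.min?]; cases Y <;> rfl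
  | cons x X ih =>
    intro Y c hX hY
    cases Y with
    | nil => rw [solLoop]; simp [PySem.List.min?]; rfl
    | cons y Y =>
      rw [solLoop, min?_id_of_sorted x X hX, min?_id_of_sorted y Y hY]
      simp only [List.erase_cons_head]
      have hX' := (List.pairwise_cons.1 hX).2
      have hY' := (List.pairwise_cons.1 hY).2
      by_cases hc : -x < -y
      · simp only [hc, if_pos, cnt]
        exact ih Y (c + 1) hX' hY'
      · simp only [hc, if_neg, not_false_iff, cnt]
        exact ih (y :: Y) c hX' hY

-- cnt over the negated ascending lists is the two-pointer count on the descending lists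
lemma cnt_neg : ∀ (As Bs : List Int) (c : Int),
    cnt (As.map (fun i => -i)) (Bs.map (fun i => -i)) c = c + (twoPtr As Bs : Int) := by
  intro As
  induction As with
  | nil => intro Bs c; cases Bs <;> simp [cnt, twoPtr]
  | cons a As ih =>
    intro Bs c
    cases Bs with
    | nil => simp [cnt, twoPtr]
    | cons b Bs =>
      simp only [List.map_cons, cnt, twoPtr, neg_neg, gt_iff_lt]
      by_cases hc : a < b
      · simp only [hc, if_pos]
        rw [ih Bs (c + 1)]
        push_cast
        ring
      · simp only [hc, if_neg, not_false_iff]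
        simpa using ih (b :: Bs) c

-- ---------- B-side: the merged event list and the sweep ----------

-- the strict "comes earlier" order of Source B's sort key (-value, tag)
def evLT (p q : Int × Int) : Prop := q.1 < p.1 ∨ (p.1 = q.1 ∧ p.2 < q.2)

-- the comparison boolean sorted2 uses for Source B's key (-value, tag)
def evB (a b : Int × Int) : Bool :=
  decide (-a.1 < -b.1) || (!decide (-b.1 < -a.1) && decide (a.2 < b.2))

lemma evB_true_iff (a b : Int × Int) : evB a b = true ↔ evLT a b := by
  unfold evB evLT
  simp only [Bool.or_eq_true, Bool.and_eq_true, Bool.not_eq_true', decide_eq_true_eq,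
    decide_eq_false_iff_not]
  omega

-- the merged event list: both lists descending, ties give the A-element first
def mergeE : List Int → List Int → List (Int × Int)
  | [], Y => Y.map (fun b => (b, (1 : Int)))
  | x :: X, [] => (x :: X).map (fun a => (a, (0 : Int)))
  | x :: X, y :: Y =>
      if y > x then (y, 1) :: mergeE (x :: X) Y
      else (x, 0) :: mergeE X (y :: Y)
termination_by X Y => X.length + Y.length

-- the sweep of Source B on an event list, pool of available B's as a Nat
def sweep : List (Int × Int) → Nat → Int → Int
  | [], _, c => c
  | e :: E, 0, c => if e.2 ≠ 0 then sweep E 1 c else sweep E 0 c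
  | e :: E, k + 1, c => if e.2 ≠ 0 then sweep E (k + 2) c else sweep E k (c + 1)

-- the three step shapes of the sweep
lemma sweep_cons_B (y : Int) (E : List (Int × Int)) (k : Nat) (c : Int) :
    sweep ((y, (1 : Int)) :: E) k c = sweep E (k + 1) c := by
  cases k <;> simp [sweep]

lemma sweep_cons_A0 (x : Int) (E : List (Int × Int)) (c : Int) :
    sweep ((x, (0 : Int)) :: E) 0 c = sweep E 0 c := by
  simp [sweep]

lemma sweep_cons_AS (x : Int) (E : List (Int × Int)) (k : Nat) (c : Int) :
    sweep ((x, (0 : Int)) :: E) (k + 1) c = sweep E k (c + 1) := by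
  simp [sweep]

-- the foldl of solution_alt computes the sweep (pool is a nonnegative int)
lemma foldl_sweep : ∀ (E : List (Int × Int)) (k : Nat) (c : Int),
    (E.foldl (fun (st : Int × Int) e =>
      if e.2 ≠ 0 then (st.1 + 1, st.2)
      else if st.1 ≠ 0 then (st.1 - 1, st.2 + 1)
      else st) ((k : Int), c)).2 = sweep E k c := by
  intro E
  induction E with
  | nil => intro k c; rfl
  | cons e E ih =>
    intro k c
    rw [List.foldl_cons]
    cases k with
    | zero =>
      rw [sweep]
      by_cases ht : e.2 ≠ 0
      · rw [if_pos ht, if_pos ht]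
        have h1 : (((0 : Nat) : Int) + 1, c) = (((1 : Nat) : Int), c) := by norm_num
        simpa [h1] using ih 1 c
      · rw [if_neg ht, if_neg ht]
        have h0 : ¬ (((0 : Nat) : Int) ≠ 0) := by simp
        rw [if_neg h0]
        exact ih 0 c
    | succ k' =>
      rw [sweep]
      by_cases ht : e.2 ≠ 0
      · rw [if_pos ht, if_pos ht]
        have h1 : (((k' + 1 : Nat) : Int) + 1, c) = (((k' + 2 : Nat) : Int), c) := by push_cast; rfl
        rw [h1, ih]
      · rw [if_neg ht, if_neg ht]
        have hne : (((k' + 1 : Nat) : Int)) ≠ 0 := by push_cast; omega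
        rw [if_pos hne]
        have h2 : (((k' + 1 : Nat) : Int) - 1, c + 1) = (((k' : Nat) : Int), c + 1) := by
          push_cast; ring_nf
        rw [h2, ih]

-- membership in mergeE
lemma mergeE_perm : ∀ (X Y : List Int),
    (mergeE X Y).Perm ((X.map (fun a => (a, (0 : Int)))) ++ (Y.map (fun b => (b, (1 : Int))))) := by
  intro X
  induction X with
  | nil => intro Y; simp [mergeE]
  | cons x X ihX =>
    intro Y
    induction Y with
    | nil => simp [mergeE]
    | cons y Y ihY =>
      rw [mergeE]
      by_cases hc : y > x
      · rw [if_pos hc]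
        refine (ihY.cons (y, 1)).trans ?_
        have hmid := @List.perm_middle _ (y, (1 : Int))
          ((x :: X).map (fun a => (a, (0 : Int)))) (Y.map (fun b => (b, (1 : Int))))
        simpa using hmid.symm
      · rw [if_neg hc]
        exact (ihX (y :: Y)).cons (x, 0)

lemma mem_mergeE {X Y : List Int} {e : Int × Int} (h : e ∈ mergeE X Y) :
    (e.1 ∈ X ∧ e.2 = 0) ∨ (e.1 ∈ Y ∧ e.2 = 1) := by
  have hmem := (mergeE_perm X Y).mem_iff.1 h
  rcases List.mem_append.1 hmem with h' | h'
  · obtain ⟨v, hv, he⟩ := List.mem_map.1 h'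
    cases he
    exact Or.inl ⟨hv, rfl⟩
  · obtain ⟨v, hv, he⟩ := List.mem_map.1 h'
    cases he
    exact Or.inr ⟨hv, rfl⟩

-- mergeE of descending lists is sorted for the event order (non-strictly)
lemma mergeE_pairwise : ∀ (X Y : List Int),
    X.Pairwise (fun a b => b ≤ a) → Y.Pairwise (fun a b => b ≤ a) →
    (mergeE X Y).Pairwise (fun p q => ¬ evLT q p) := by
  intro X
  induction X with
  | nil =>
    intro Y _ hY
    simp only [mergeE]
    refine (List.pairwise_map).2 (hY.imp ?_)
    intro a b hba
    simp [evLT]; omega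
  | cons x X ihX =>
    intro Y hX hY
    induction Y with
    | nil =>
      simp only [mergeE]
      refine (List.pairwise_map).2 (hX.imp ?_)
      intro a b hba
      simp [evLT]; omega
    | cons y Y ihY =>
      rw [mergeE]
      have hX' := (List.pairwise_cons.1 hX)
      have hY' := (List.pairwise_cons.1 hY)
      by_cases hc : y > x
      · simp only [hc, if_pos]
        refine List.pairwise_cons.2 ⟨?_, ihY hY'.2⟩
        intro e he
        rcases mem_mergeE he with ⟨hv, ht⟩ | ⟨hv, ht⟩
        · rcases List.mem_cons.1 hv with h | h
          · subst h; simp [evLT, ht]; omega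
          · have := hX'.1 _ h; simp [evLT, ht]; omega
        · have := hY'.1 _ hv; simp [evLT, ht]; omega
      · simp only [hc, if_neg, not_false_iff]
        refine List.pairwise_cons.2 ⟨?_, ihX (y :: Y) hX'.2 hY⟩
        intro e he
        rcases mem_mergeE he with ⟨hv, ht⟩ | ⟨hv, ht⟩
        · have := hX'.1 _ hv; simp [evLT, ht]; omega
        · rcases List.mem_cons.1 hv with h | h
          · subst h; simp [evLT, ht]; omega
          · have := hY'.1 _ h; simp [evLT, ht]; omega

-- the insertion sort of sorted2 produces a list sorted for the event order
lemma insertBy_pairwise (x : Int × Int) :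
    ∀ (l : List (Int × Int)), l.Pairwise (fun p q => ¬ evLT q p) →
    (PySem.List.insertBy evB x l).Pairwise (fun p q => ¬ evLT q p) := by
  intro l
  induction l with
  | nil => intro _; simp [PySem.List.insertBy]
  | cons y l ih =>
    intro h
    have h' := List.pairwise_cons.1 h
    rw [PySem.List.insertBy]
    by_cases hb : evLT x y
    · rw [if_pos ((evB_true_iff x y).2 hb)]
      refine List.pairwise_cons.2 ⟨?_, h⟩
      intro z hz
      rcases List.mem_cons.1 hz with rfl | hz'
      · unfold evLT at hb ⊢; omega
      · have := h'.1 _ hz'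
        unfold evLT at hb this ⊢; omega
    · rw [if_neg (fun hbt => hb ((evB_true_iff x y).1 hbt))]
      refine List.pairwise_cons.2 ⟨?_, ih h'.2⟩
      intro z hz
      rcases (PySem.List.mem_insertBy _ _ _ _).1 hz with rfl | hz'
      · exact hb
      · exact h'.1 _ hz'

lemma sorted2_pairwise (xs : List (Int × Int)) :
    (PySem.List.sorted2 xs (fun p => -p.1) (fun p => p.2) false).Pairwise
      (fun p q => ¬ evLT q p) := by
  show (List.foldl (fun acc x => PySem.List.insertBy evB x acc) [] xs).Pairwise
      (fun p q => ¬ evLT q p)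
  generalize hinit : ([] : List (Int × Int)) = init
  have hp : init.Pairwise (fun p q => ¬ evLT q p) := by rw [← hinit]; simp
  clear hinit
  induction xs generalizing init with
  | nil => exact hp
  | cons x xs ih => exact ih _ (insertBy_pairwise x init hp)

-- the event order separates: two mutually not-less events are equal
lemma evLT_antisymm (p q : Int × Int) (h1 : ¬ evLT p q) (h2 : ¬ evLT q p) : p = q := by
  unfold evLT at h1 h2
  have h3 : p.1 = q.1 ∧ p.2 = q.2 := by omega
  exact Prod.ext h3.1 h3.2

-- sorted2 of the tagged concatenation IS the merge of the two descending sorts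
lemma sorted2_eq_mergeE (A B : List Int) :
    PySem.List.sorted2
      ((A.map (fun a => (a, (0 : Int)))) ++ (B.map (fun b => (b, (1 : Int)))))
      (fun p => -p.1) (fun p => p.2) false
    = mergeE (PySem.List.sorted A (fun x => x) true) (PySem.List.sorted B (fun x => x) true) := by
  set As := PySem.List.sorted A (fun x => x) true with hAs
  set Bs := PySem.List.sorted B (fun x => x) true with hBs
  apply List.Perm.eq_of_pairwise (le := fun p q => ¬ evLT q p)
  · intro p q _ _ h1 h2
    exact evLT_antisymm p q h2 h1
  · exact sorted2_pairwise _
  · exact mergeE_pairwise As Bs (PySem.List.sorted_pairwise_rev A (fun x => x))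
      (PySem.List.sorted_pairwise_rev B (fun x => x))
  · exact (PySem.List.sorted2_perm _ _ _ _).trans
      ((((PySem.List.sorted_perm A (fun x => x) true).map _).symm.append
        ((PySem.List.sorted_perm B (fun x => x) true).map _).symm).trans
        (mergeE_perm As Bs).symm)

-- ---------- the combinatorial core: sweep over the merge = two-pointer count ----------

lemma twoPtr_le_length : ∀ (X Y : List Int), twoPtr X Y ≤ X.length := by
  intro X
  induction X with
  | nil => intro Y; cases Y <;> simp [twoPtr]
  | cons x X ih =>
    intro Y
    cases Y with
    | nil => simp [twoPtr]
    | cons y Y =>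
      rw [twoPtr]
      by_cases hc : y > x
      · simp only [hc, if_pos, List.length_cons]
        have := ih Y; omega
      · simp only [hc, if_neg, not_false_iff, List.length_cons]
        have := ih (y :: Y); omega

-- dropping the largest A element changes the count by 0, or by 1 only when
-- the rest of A is fully matched
lemma twoPtr_cons : ∀ (Y X : List Int) (x : Int), (∀ a ∈ X, a ≤ x) → X.Pairwise (fun a b => b ≤ a) →
    twoPtr (x :: X) Y = twoPtr X Y ∨
    (twoPtr (x :: X) Y = twoPtr X Y + 1 ∧ twoPtr X Y = X.length) := by
  intro Y
  induction Y with
  | nil => intro X x _ _; left; cases X <;> simp [twoPtr]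
  | cons y Y ih =>
    intro X x hub hX
    rw [twoPtr]
    by_cases hc : y > x
    · simp only [hc, if_pos]
      cases X with
      | nil => right; simp [twoPtr]
      | cons x' X' =>
        have hx' : x' ≤ x := hub x' (by simp)
        have hc' : y > x' := by omega
        have hX' := List.pairwise_cons.1 hX
        rw [twoPtr, if_pos hc']
        rcases ih X' x' hX'.1 hX'.2 with h | ⟨h1, h2⟩
        · left; omega
        · right; constructor <;> simp [h1, h2]
    · rw [if_neg hc]
      left
      rfl

-- sweep over a pure-B tail never counts
lemma sweep_allB : ∀ (Y : List Int) (k : Nat) (c : Int),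
    sweep (Y.map (fun b => (b, (1 : Int)))) k c = c := by
  intro Y
  induction Y with
  | nil => intro k c; rfl
  | cons y Y ih =>
    intro k c
    rw [List.map_cons, sweep_cons_B]
    exact ih (k + 1) c

-- sweep over a pure-A tail counts min(|X|, pool)
lemma sweep_allA : ∀ (X : List Int) (k : Nat) (c : Int),
    sweep (X.map (fun a => (a, (0 : Int)))) k c = c + (min X.length k : Nat) := by
  intro X
  induction X with
  | nil => intro k c; simp [sweep]
  | cons x X ih =>
    intro k c
    cases k with
    | zero =>
      rw [List.map_cons, sweep_cons_A0, ih 0 c]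
      simp
    | succ k' =>
      rw [List.map_cons, sweep_cons_AS, ih k' (c + 1)]
      have hm : min (x :: X).length (k' + 1) = min X.length k' + 1 := by
        simp only [List.length_cons]; omega
      rw [hm]
      push_cast
      ring

-- the invariant: sweeping the merge with pool k yields min(|X|, k + twoPtr X Y)
lemma sweep_mergeE : ∀ (n : Nat) (X Y : List Int) (k : Nat) (c : Int), X.length + Y.length = n →
    X.Pairwise (fun a b => b ≤ a) →
    sweep (mergeE X Y) k c = c + (min X.length (k + twoPtr X Y) : Nat) := by
  intro n
  induction n using Nat.strong_induction_on with
  | _ n ih =>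
    intro X Y k c hn hX
    cases X with
    | nil => rw [mergeE, sweep_allB]; simp [twoPtr]
    | cons x X' =>
      cases Y with
      | nil =>
        rw [mergeE, sweep_allA]
        have : twoPtr (x :: X') [] = 0 := by simp [twoPtr]
        rw [this]
        simp
      | cons y Y' =>
        rw [mergeE]
        have hX'' := List.pairwise_cons.1 hX
        by_cases hc : y > x
        · rw [if_pos hc, sweep_cons_B]
          rw [ih ((x :: X').length + Y'.length) (by simp at hn ⊢; omega) (x :: X') Y' (k + 1) c rfl hX]
          have ht : twoPtr (x :: X') (y :: Y') = twoPtr X' Y' + 1 := by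
            rw [twoPtr, if_pos hc]
          rcases twoPtr_cons Y' X' x hX''.1 hX''.2 with h | ⟨h1, h2⟩
          · rw [ht, h]
            have harith : k + 1 + twoPtr X' Y' = k + (twoPtr X' Y' + 1) := by omega
            rw [harith]
          · rw [ht, h1]
            have := twoPtr_le_length X' Y'
            congr 1
            norm_cast
            simp only [List.length_cons]
            omega
        · rw [if_neg hc]
          have ht : twoPtr (x :: X') (y :: Y') = twoPtr X' (y :: Y') := by
            rw [twoPtr, if_neg hc]
          have hrec : ∀ (k'' : Nat) (c'' : Int),
              sweep (mergeE X' (y :: Y')) k'' c'' = c'' + (min X'.length (k'' + twoPtr X' (y :: Y')) : Nat) := by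
            intro k'' c''
            exact ih (X'.length + (y :: Y').length) (by simp only [List.length_cons] at hn ⊢; omega) X' (y :: Y') k'' c'' rfl hX''.2
          cases k with
          | zero =>
            rw [sweep_cons_A0, hrec 0 c, ht]
            have := twoPtr_le_length X' (y :: Y')
            congr 1
            norm_cast
            simp only [List.length_cons]
            omega
          | succ k' =>
            rw [sweep_cons_AS, hrec k' (c + 1), ht]
            have : (min (x :: X').length (k' + 1 + twoPtr X' (y :: Y')) : Nat)
                = min X'.length (k' + twoPtr X' (y :: Y')) + 1 := by
              simp only [List.length_cons]; omega
            rw [this]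
            push_cast
            ring

-- ===== VERDICT (by name: the statement is the Claim_ definition above) =====
theorem solution_spec : Claim_equal_solution := by
  intro A B _
  unfold Spec_solution solution solution_alt
  set As := PySem.List.sorted A (fun x => x) true with hAs
  set Bs := PySem.List.sorted B (fun x => x) true with hBs
  -- A's side: heap loop = two-pointer count on the descending sorts
  have hpA : (A.map (fun i => -i)).Perm (As.map (fun i => -i)) :=
    ((PySem.List.sorted_perm A (fun x => x) true).symm.map _)
  have hpB : (B.map (fun i => -i)).Perm (Bs.map (fun i => -i)) :=
    ((PySem.List.sorted_perm B (fun x => x) true).symm.map _)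
  have hsA : (As.map (fun i => -i)).Pairwise (· ≤ ·) := by
    have := PySem.List.sorted_pairwise_rev A (fun x => x)
    rw [← hAs] at this
    exact (List.pairwise_map).2 (this.imp (by intro a b h; omega))
  have hsB : (Bs.map (fun i => -i)).Pairwise (· ≤ ·) := by
    have := PySem.List.sorted_pairwise_rev B (fun x => x)
    rw [← hBs] at this
    exact (List.pairwise_map).2 (this.imp (by intro a b h; omega))
  rw [solLoop_perm (A.map (fun i => -i)).length _ _ _ _ 0 rfl hpA hpB,
      solLoop_sorted _ _ 0 hsA hsB, cnt_neg]
  -- B's side: sorted2 = mergeE, fold = sweep, sweep = two-pointer count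
  rw [sorted2_eq_mergeE A B, ← hAs, ← hBs]
  have h0 : ((0 : Int), (0 : Int)) = (((0 : Nat) : Int), (0 : Int)) := by norm_num
  rw [h0, foldl_sweep]
  rw [sweep_mergeE (As.length + Bs.length) As Bs 0 0 rfl
      (by rw [hAs]; exact PySem.List.sorted_pairwise_rev A (fun x => x))]
  have := twoPtr_le_length As Bs
  simp only [zero_add]
  congr 1
  omega
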